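-- pv_equiv track=rewrite | github.com/a-gavriel/Python-Games | Clases/Clases-Ejecicios/c08.py | suma_impar
-- ===== SOURCE A (Python) =====
-- def suma_impar(num):
-- 	if num == 0:
-- 		return 0
-- 	else:
-- 		dig = num%10
-- 		if dig%2 == 1:
-- 			return dig + suma_impar(num//10)
-- 		else:
--
-- 			return suma_impar(num//10)
-- ===== SOURCE B (Python) =====
-- def suma_impar(num):
--     digits = []
--     while num != 0:
--         digits.append(num % 10)
--         num //= 10
--     return sum(d for d in digits if d % 2 == 1)
-- ===== Notes on version B (the rewrite author's own statement) =====
-- stated objective: alternative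
-- what changed: Replaces the one-digit-per-call recursion with two staged passes: an iterative loop that collects all digits into a list, then a filter-and-sum over that list keeping the odd digits.
import Mathlib
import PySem

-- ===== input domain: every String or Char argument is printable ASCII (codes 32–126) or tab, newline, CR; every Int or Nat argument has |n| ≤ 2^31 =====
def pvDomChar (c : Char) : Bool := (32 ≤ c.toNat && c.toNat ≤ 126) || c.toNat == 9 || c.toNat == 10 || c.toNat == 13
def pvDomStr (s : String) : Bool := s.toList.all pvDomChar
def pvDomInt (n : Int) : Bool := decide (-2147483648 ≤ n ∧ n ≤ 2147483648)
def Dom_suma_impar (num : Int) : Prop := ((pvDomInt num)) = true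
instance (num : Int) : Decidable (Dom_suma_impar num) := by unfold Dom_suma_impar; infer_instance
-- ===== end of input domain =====

-- B replaces A's per-digit recursion with two staged passes: collect the digits into a list,
-- then filter-and-sum the odd ones; same values on all num ≥ 0.

-- ===== PORT A =====
-- A's recursion ported with a fuel counter (num.toNat + 1, always enough for num ≥ 0)
-- solely to make the recursion total; the branch structure is A's.
def sumaImparRec (fuel : Nat) (num : Int) : Int :=
  match fuel with
  | 0 => 0
  | f + 1 =>
    if num = 0 then 0
    else
      let dig := PySem.Int.mod num 10
      if PySem.Int.mod dig 2 = 1 then dig + sumaImparRec f (PySem.Int.floordiv num 10)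
      else sumaImparRec f (PySem.Int.floordiv num 10)

def suma_impar (num : Int) : Int := sumaImparRec (num.toNat + 1) num

-- ===== PORT B =====
-- B's first pass: the while-loop appending num % 10 to the digit list (same fuel bound for totality).
def digitsLoop (fuel : Nat) (num : Int) (digits : List Int) : List Int :=
  match fuel with
  | 0 => digits
  | f + 1 =>
    if num = 0 then digits
    else digitsLoop f (PySem.Int.floordiv num 10) (digits ++ [PySem.Int.mod num 10])

-- B's second pass: sum(d for d in digits if d % 2 == 1)
def suma_impar_alt (num : Int) : Int :=
  ((digitsLoop (num.toNat + 1) num []).filter (fun d => PySem.Int.mod d 2 == 1)).foldl (· + ·) 0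

-- ===== PRECONDITION & SPEC =====
-- A raises RecursionError on num < 0 (num//10 never reaches 0); Pre_ keeps num ≥ 0.
def Pre_suma_impar (num : Int) : Prop := 0 ≤ num
instance (num : Int) : Decidable (Pre_suma_impar num) := by unfold Pre_suma_impar; infer_instance
def pvWitness_suma_impar : Int := (135)

def Spec_suma_impar (num : Int) (out : Int) : Prop := out = suma_impar_alt num
instance (num : Int) (out : Int) : Decidable (Spec_suma_impar num out) := by unfold Spec_suma_impar; infer_instance

-- ===== CLAIM =====
def Claim_equal_suma_impar : Prop := ∀ (num : Int), Dom_suma_impar num → Pre_suma_impar num → Spec_suma_impar num (suma_impar num)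

-- ===== LEMMAS AND PROOFS =====
-- sum of the odd entries of a list, as B computes it
def oddSum (l : List Int) : Int := (l.filter (fun d => PySem.Int.mod d 2 == 1)).foldl (· + ·) 0

theorem oddSum_append_one (l : List Int) (d : Int) :
    oddSum (l ++ [d]) = oddSum l + (if PySem.Int.mod d 2 = 1 then d else 0) := by
  unfold oddSum
  rw [List.filter_append, List.foldl_append]
  by_cases h : PySem.Int.mod d 2 = 1
  · have hp : (PySem.Int.mod d 2 == 1) = true := by simp only [h]; decide
    have hf : List.filter (fun d => PySem.Int.mod d 2 == 1) [d] = [d] := by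
      simp only [List.filter_cons, List.filter_nil, hp]; rfl
    rw [hf, if_pos h]; simp
  · have hp : (PySem.Int.mod d 2 == 1) = false := by
      rw [beq_eq_false_iff_ne]; exact h
    have hf : List.filter (fun d => PySem.Int.mod d 2 == 1) [d] = [] := by
      simp only [List.filter_cons, List.filter_nil, hp]; rfl
    rw [hf, if_neg h]; simp

theorem digitsLoop_oddSum (fuel : Nat) :
    ∀ (num : Int) (digits : List Int),
      oddSum (digitsLoop fuel num digits) = oddSum digits + sumaImparRec fuel num := by
  induction fuel with
  | zero => intro num digits; simp [digitsLoop, sumaImparRec]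
  | succ f ih =>
    intro num digits
    simp only [digitsLoop, sumaImparRec]
    by_cases h0 : num = 0
    · simp [h0]
    · simp only [h0, if_false]
      rw [ih, oddSum_append_one]
      split_ifs with h <;> ring

-- ===== VERDICT =====
theorem suma_impar_spec : Claim_equal_suma_impar := by
  intro num _ _
  show suma_impar num = suma_impar_alt num
  unfold suma_impar suma_impar_alt
  have := digitsLoop_oddSum (num.toNat + 1) num []
  unfold oddSum at this
  simp only [List.filter_nil, List.foldl_nil, zero_add] at this
  exact this.symm
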